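-- pv_equiv track=rewrite | github.com/gimquokka/problem-solving | AejiJeon/baekjoonOJ/implemenation/14499rollingDice.py | rollDice
-- ===== SOURCE A (Python) =====
-- import copy
--
-- def rollDice(dice, d):
--
--     new_dice = copy.deepcopy(dice)
--     # (0,1) ~ (3,1) 4개의 숫자들이
--     # 위로 한 칸씩 이동함(맨 위 숫자는 맨 아래로)
--     if d == 3:
--
--         for i in range(4):
--             if i == 3:
--                 new_dice[i][1] = dice[0][1]
--             else:
--                 new_dice[i][1] = dice[i + 1][1]
--     # (0,1) ~ (3,1) 4개의 숫자들이
--     # 아래로 한 칸씩 이동함(맨 아래 숫자는 맨 위로)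
--     elif d == 4:
--
--         for i in range(4):
--             if i == 3:
--                 new_dice[0][1] = dice[i][1]
--             else:
--                 new_dice[i + 1][1] = dice[i][1]
--
--     # (1,0), (1,1), (1,2), (3,1) 숫자들이
--     # 오른쪽으로 한 칸씩 이동(맨 오른쪽 숫자는 맨 왼쪽으로)
--     elif d == 1:
--         new_dice[1][0] = dice[3][1]
--         new_dice[1][1] = dice[1][0]
--         new_dice[1][2] = dice[1][1]
--         new_dice[3][1] = dice[1][2]
--
--     # (1,0), (1,1), (1,2), (3,1) 숫자들이
--     # 왼쪽으로 한 칸씩 이동(맨 왼쪽 숫자는 맨 오른쪽으로)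
--     elif d == 2:
--         new_dice[1][0] = dice[1][1]
--         new_dice[1][1] = dice[1][2]
--         new_dice[1][2] = dice[3][1]
--         new_dice[3][1] = dice[1][0]
--
--     return new_dice
-- ===== SOURCE B (Python) =====
-- import copy
--
-- # The two 4-cycles of cells a roll moves values around:
-- _COL = [(0, 1), (1, 1), (2, 1), (3, 1)]   # north/south ring, top to bottom
-- _ROW = [(1, 0), (1, 1), (1, 2), (3, 1)]   # east/west ring, left to right (wrapping via bottom)
--
-- def _rot(dice, ring):
--     """One rotation step: each ring cell takes the value of the next ring cell."""
--     new = copy.deepcopy(dice)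
--     n = len(ring)
--     for k, (i, j) in enumerate(ring):
--         si, sj = ring[(k + 1) % n]
--         new[i][j] = dice[si][sj]
--     return new
--
-- def rollDice(dice, d):
--     # opposite directions are inverse rotations of the same ring: rot^-1 = rot^3 on a 4-cycle
--     if d == 3:
--         return _rot(dice, _COL)
--     if d == 4:
--         return _rot(_rot(_rot(dice, _COL), _COL), _COL)
--     if d == 2:
--         return _rot(dice, _ROW)
--     if d == 1:
--         return _rot(_rot(_rot(dice, _ROW), _ROW), _ROW)
--     return copy.deepcopy(dice)
-- ===== Notes on version B (the rewrite author's own statement) =====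
-- stated objective: alternative
-- what changed: B replaces A's four hard-coded per-direction assignment blocks by a single generic ring-rotation primitive over two cell rings, obtaining each opposite direction (d=4, d=1) as the third power of the rotation for its inverse direction (d=3, d=2) instead of writing its assignments out.
import Mathlib
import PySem

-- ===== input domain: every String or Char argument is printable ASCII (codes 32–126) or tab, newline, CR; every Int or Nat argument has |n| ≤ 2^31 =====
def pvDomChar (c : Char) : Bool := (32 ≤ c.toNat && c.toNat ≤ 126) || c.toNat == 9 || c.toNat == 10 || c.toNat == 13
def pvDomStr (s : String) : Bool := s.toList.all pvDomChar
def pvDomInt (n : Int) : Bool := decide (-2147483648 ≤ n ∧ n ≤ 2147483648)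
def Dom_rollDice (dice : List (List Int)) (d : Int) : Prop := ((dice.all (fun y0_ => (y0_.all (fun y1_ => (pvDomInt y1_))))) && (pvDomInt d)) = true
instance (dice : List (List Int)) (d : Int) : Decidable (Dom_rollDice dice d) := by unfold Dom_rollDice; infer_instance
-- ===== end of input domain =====

-- B replaces A's four hard-coded per-direction assignment blocks by one generic ring-rotation
-- primitive over two cell rings, composing it three times for each inverse direction
-- (objective: alternative; same cost). Return-value equivalence only (A mutates a deepcopy,
-- not its argument).

-- dice[i][j] (exact under Pre_, which keeps the touched indices in range)
def pvGet2 (xs : List (List Int)) (i j : Int) : Int :=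
  PySem.List.pyGetD (PySem.List.pyGetD xs i []) j 0

-- xs with xs[i][j] = v (exact under Pre_: indices in range)
def pvSet2 (xs : List (List Int)) (i j : Int) (v : Int) : List (List Int) :=
  PySem.List.pySetD xs i (PySem.List.pySetD (PySem.List.pyGetD xs i []) j v)

-- ===== PORT A =====
def rollDice (dice : List (List Int)) (d : Int) : List (List Int) :=
  let new_dice := dice
  if d = 3 then
    (PySem.List.pyRange 0 4 1).foldl
      (fun nd i =>
        if i = 3 then pvSet2 nd i 1 (pvGet2 dice 0 1)
        else pvSet2 nd i 1 (pvGet2 dice (i + 1) 1)) new_dice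
  else if d = 4 then
    (PySem.List.pyRange 0 4 1).foldl
      (fun nd i =>
        if i = 3 then pvSet2 nd 0 1 (pvGet2 dice i 1)
        else pvSet2 nd (i + 1) 1 (pvGet2 dice i 1)) new_dice
  else if d = 1 then
    let nd := pvSet2 new_dice 1 0 (pvGet2 dice 3 1)
    let nd := pvSet2 nd 1 1 (pvGet2 dice 1 0)
    let nd := pvSet2 nd 1 2 (pvGet2 dice 1 1)
    pvSet2 nd 3 1 (pvGet2 dice 1 2)
  else if d = 2 then
    let nd := pvSet2 new_dice 1 0 (pvGet2 dice 1 1)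
    let nd := pvSet2 nd 1 1 (pvGet2 dice 1 2)
    let nd := pvSet2 nd 1 2 (pvGet2 dice 3 1)
    pvSet2 nd 3 1 (pvGet2 dice 1 0)
  else new_dice

-- ===== PORT B =====
-- the two cell rings of Source B
def pvCol : List (Int × Int) := [(0, 1), (1, 1), (2, 1), (3, 1)]
def pvRow : List (Int × Int) := [(1, 0), (1, 1), (1, 2), (3, 1)]

-- _rot of Source B: each ring cell takes the value of the next ring cell (read from the input dice)
def pvRot (dice : List (List Int)) (ring : List (Int × Int)) : List (List Int) :=
  (PySem.List.enumerate ring).foldl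
    (fun nd kp =>
      let s := PySem.List.pyGetD ring (PySem.Int.mod (kp.1 + 1) (ring.length : Int)) (0, 0)
      pvSet2 nd kp.2.1 kp.2.2 (pvGet2 dice s.1 s.2)) dice

def rollDice_alt (dice : List (List Int)) (d : Int) : List (List Int) :=
  if d = 3 then pvRot dice pvCol
  else if d = 4 then pvRot (pvRot (pvRot dice pvCol) pvCol) pvCol
  else if d = 2 then pvRot dice pvRow
  else if d = 1 then pvRot (pvRot (pvRot dice pvRow) pvRow) pvRow
  else dice

-- ===== PRECONDITION & SPEC =====
-- Pre_ excludes exactly the inputs where the Python A raises IndexError: boards too small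
-- for the cells the chosen direction touches.
def Pre_rollDice (dice : List (List Int)) (d : Int) : Prop :=
  if d = 3 ∨ d = 4 then
    4 ≤ dice.length ∧ ∀ i ∈ ([0, 1, 2, 3] : List Nat), 2 ≤ (dice.getD i []).length
  else if d = 1 ∨ d = 2 then
    4 ≤ dice.length ∧ 3 ≤ (dice.getD 1 []).length ∧ 2 ≤ (dice.getD 3 []).length
  else True
instance (dice : List (List Int)) (d : Int) : Decidable (Pre_rollDice dice d) := by
  unfold Pre_rollDice; infer_instance

def pvWitness_rollDice : List (List Int) × Int :=
  ([[0, 1, 0], [2, 3, 4], [0, 5, 0], [0, 6, 0]], 1)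

def Spec_rollDice (dice : List (List Int)) (d : Int) (out : List (List Int)) : Prop := out = rollDice_alt dice d
instance (dice : List (List Int)) (d : Int) (out : List (List Int)) : Decidable (Spec_rollDice dice d out) := by unfold Spec_rollDice; infer_instance

-- ===== CLAIM (what is proved, stated in full; the proofs are below) =====
def Claim_equal_rollDice : Prop := ∀ (dice : List (List Int)) (d : Int), Dom_rollDice dice d → Pre_rollDice dice d → Spec_rollDice dice d (rollDice dice d)

-- ===== LEMMAS AND PROOFS =====

lemma hRange : PySem.List.pyRange 0 4 1 = [0, 1, 2, 3] := by decide

-- pvRot applied to each ring, written out as its four cell assignments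
lemma pvRot_col (dice : List (List Int)) : pvRot dice pvCol =
    pvSet2 (pvSet2 (pvSet2 (pvSet2 dice 0 1 (pvGet2 dice 1 1)) 1 1 (pvGet2 dice 2 1)) 2 1
      (pvGet2 dice 3 1)) 3 1 (pvGet2 dice 0 1) := by rfl

lemma pvRot_row (dice : List (List Int)) : pvRot dice pvRow =
    pvSet2 (pvSet2 (pvSet2 (pvSet2 dice 1 0 (pvGet2 dice 1 1)) 1 1 (pvGet2 dice 1 2)) 1 2
      (pvGet2 dice 3 1)) 3 1 (pvGet2 dice 1 0) := by rfl

-- pvGet2 / pvSet2 on an explicitly destructured board, for each cell the programs touch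
lemma get01 (a b : Int) (u : List Int) (t : List (List Int)) : pvGet2 ((a::b::u)::t) 0 1 = b := by
  simp [pvGet2, PySem.List.pyGetD_ofNat']
lemma get11 (r0 : List Int) (a b : Int) (u : List Int) (t : List (List Int)) : pvGet2 (r0::(a::b::u)::t) 1 1 = b := by
  simp [pvGet2, PySem.List.pyGetD_ofNat']
lemma get21 (r0 r1 : List Int) (a b : Int) (u : List Int) (t : List (List Int)) : pvGet2 (r0::r1::(a::b::u)::t) 2 1 = b := by
  simp [pvGet2, PySem.List.pyGetD_ofNat']
lemma get31 (r0 r1 r2 : List Int) (a b : Int) (u : List Int) (t : List (List Int)) : pvGet2 (r0::r1::r2::(a::b::u)::t) 3 1 = b := by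
  simp [pvGet2, PySem.List.pyGetD_ofNat']
lemma get10 (r0 : List Int) (a : Int) (u : List Int) (t : List (List Int)) : pvGet2 (r0::(a::u)::t) 1 0 = a := by
  simp [pvGet2, PySem.List.pyGetD_ofNat']
lemma get12 (r0 : List Int) (a b c : Int) (u : List Int) (t : List (List Int)) : pvGet2 (r0::(a::b::c::u)::t) 1 2 = c := by
  simp [pvGet2, PySem.List.pyGetD_ofNat']
lemma set01 (a b v : Int) (u : List Int) (t : List (List Int)) : pvSet2 ((a::b::u)::t) 0 1 v = (a::v::u)::t := by
  simp [pvSet2, PySem.List.pySetD_of_nonneg, PySem.List.pyGetD_ofNat']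
lemma set11 (r0 : List Int) (a b v : Int) (u : List Int) (t : List (List Int)) : pvSet2 (r0::(a::b::u)::t) 1 1 v = r0::(a::v::u)::t := by
  simp [pvSet2, PySem.List.pySetD_of_nonneg, PySem.List.pyGetD_ofNat']
lemma set21 (r0 r1 : List Int) (a b v : Int) (u : List Int) (t : List (List Int)) : pvSet2 (r0::r1::(a::b::u)::t) 2 1 v = r0::r1::(a::v::u)::t := by
  simp [pvSet2, PySem.List.pySetD_of_nonneg, PySem.List.pyGetD_ofNat']
lemma set31 (r0 r1 r2 : List Int) (a b v : Int) (u : List Int) (t : List (List Int)) : pvSet2 (r0::r1::r2::(a::b::u)::t) 3 1 v = r0::r1::r2::(a::v::u)::t := by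
  simp [pvSet2, PySem.List.pySetD_of_nonneg, PySem.List.pyGetD_ofNat']
lemma set10 (r0 : List Int) (a v : Int) (u : List Int) (t : List (List Int)) : pvSet2 (r0::(a::u)::t) 1 0 v = r0::(v::u)::t := by
  simp [pvSet2, PySem.List.pySetD_of_nonneg, PySem.List.pyGetD_ofNat']
lemma set12 (r0 : List Int) (a b c v : Int) (u : List Int) (t : List (List Int)) : pvSet2 (r0::(a::b::c::u)::t) 1 2 v = r0::(a::b::v::u)::t := by
  simp [pvSet2, PySem.List.pySetD_of_nonneg, PySem.List.pyGetD_ofNat']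

-- agreement of the two ports on a fully destructured board, one lemma per direction
lemma roll_eq3 (a0 b0 : Int) (u0 : List Int) (a1 b1 : Int) (u1 : List Int)
    (a2 b2 : Int) (u2 : List Int) (a3 b3 : Int) (u3 : List Int) (t : List (List Int)) :
    rollDice ((a0::b0::u0)::(a1::b1::u1)::(a2::b2::u2)::(a3::b3::u3)::t) 3
      = rollDice_alt ((a0::b0::u0)::(a1::b1::u1)::(a2::b2::u2)::(a3::b3::u3)::t) 3 := by
  norm_num [rollDice, rollDice_alt, hRange, List.foldl, pvRot_col,
    get01, get11, get21, get31, set01, set11, set21, set31]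

lemma roll_eq4 (a0 b0 : Int) (u0 : List Int) (a1 b1 : Int) (u1 : List Int)
    (a2 b2 : Int) (u2 : List Int) (a3 b3 : Int) (u3 : List Int) (t : List (List Int)) :
    rollDice ((a0::b0::u0)::(a1::b1::u1)::(a2::b2::u2)::(a3::b3::u3)::t) 4
      = rollDice_alt ((a0::b0::u0)::(a1::b1::u1)::(a2::b2::u2)::(a3::b3::u3)::t) 4 := by
  norm_num [rollDice, rollDice_alt, hRange, List.foldl, pvRot_col,
    get01, get11, get21, get31, set01, set11, set21, set31]

lemma roll_eq1 (r0 : List Int) (a1 b1 c1 : Int) (u1 : List Int) (r2 : List Int)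
    (a3 b3 : Int) (u3 : List Int) (t : List (List Int)) :
    rollDice (r0::(a1::b1::c1::u1)::r2::(a3::b3::u3)::t) 1
      = rollDice_alt (r0::(a1::b1::c1::u1)::r2::(a3::b3::u3)::t) 1 := by
  norm_num [rollDice, rollDice_alt, pvRot_row,
    get10, get11, get12, get31, set10, set11, set12, set31]

lemma roll_eq2 (r0 : List Int) (a1 b1 c1 : Int) (u1 : List Int) (r2 : List Int)
    (a3 b3 : Int) (u3 : List Int) (t : List (List Int)) :
    rollDice (r0::(a1::b1::c1::u1)::r2::(a3::b3::u3)::t) 2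
      = rollDice_alt (r0::(a1::b1::c1::u1)::r2::(a3::b3::u3)::t) 2 := by
  norm_num [rollDice, rollDice_alt, pvRot_row,
    get10, get11, get12, get31, set10, set11, set12, set31]

-- ===== VERDICT =====
theorem rollDice_spec : Claim_equal_rollDice := by
  intro dice d _ hpre
  unfold Spec_rollDice
  by_cases h3 : d = 3
  · subst h3
    have hp : 4 ≤ dice.length ∧ ∀ i ∈ ([0, 1, 2, 3] : List Nat), 2 ≤ (dice.getD i []).length := by
      simpa [Pre_rollDice] using hpre
    obtain ⟨hlen, hrows⟩ := hp
    have h0 := hrows 0 (by simp); have h1 := hrows 1 (by simp)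
    have h2 := hrows 2 (by simp); have h3' := hrows 3 (by simp)
    rcases dice with _|⟨r0,dice⟩; · simp at hlen
    rcases dice with _|⟨r1,dice⟩; · simp at hlen
    rcases dice with _|⟨r2,dice⟩; · simp at hlen
    rcases dice with _|⟨r3,t⟩; · simp at hlen
    simp only [List.getD_cons_zero, List.getD_cons_succ] at h0 h1 h2 h3'
    rcases r0 with _|⟨a0,r0⟩; · simp at h0
    rcases r0 with _|⟨b0,u0⟩; · simp at h0
    rcases r1 with _|⟨a1,r1⟩; · simp at h1
    rcases r1 with _|⟨b1,u1⟩; · simp at h1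
    rcases r2 with _|⟨a2,r2⟩; · simp at h2
    rcases r2 with _|⟨b2,u2⟩; · simp at h2
    rcases r3 with _|⟨a3,r3⟩; · simp at h3'
    rcases r3 with _|⟨b3,u3⟩; · simp at h3'
    exact roll_eq3 a0 b0 u0 a1 b1 u1 a2 b2 u2 a3 b3 u3 t
  by_cases h4 : d = 4
  · subst h4
    have hp : 4 ≤ dice.length ∧ ∀ i ∈ ([0, 1, 2, 3] : List Nat), 2 ≤ (dice.getD i []).length := by
      simpa [Pre_rollDice] using hpre
    obtain ⟨hlen, hrows⟩ := hp
    have h0 := hrows 0 (by simp); have h1 := hrows 1 (by simp)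
    have h2 := hrows 2 (by simp); have h3' := hrows 3 (by simp)
    rcases dice with _|⟨r0,dice⟩; · simp at hlen
    rcases dice with _|⟨r1,dice⟩; · simp at hlen
    rcases dice with _|⟨r2,dice⟩; · simp at hlen
    rcases dice with _|⟨r3,t⟩; · simp at hlen
    simp only [List.getD_cons_zero, List.getD_cons_succ] at h0 h1 h2 h3'
    rcases r0 with _|⟨a0,r0⟩; · simp at h0
    rcases r0 with _|⟨b0,u0⟩; · simp at h0
    rcases r1 with _|⟨a1,r1⟩; · simp at h1
    rcases r1 with _|⟨b1,u1⟩; · simp at h1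
    rcases r2 with _|⟨a2,r2⟩; · simp at h2
    rcases r2 with _|⟨b2,u2⟩; · simp at h2
    rcases r3 with _|⟨a3,r3⟩; · simp at h3'
    rcases r3 with _|⟨b3,u3⟩; · simp at h3'
    exact roll_eq4 a0 b0 u0 a1 b1 u1 a2 b2 u2 a3 b3 u3 t
  by_cases h1 : d = 1
  · subst h1
    have hp : 4 ≤ dice.length ∧ 3 ≤ (dice.getD 1 []).length ∧ 2 ≤ (dice.getD 3 []).length := by
      simpa [Pre_rollDice] using hpre
    obtain ⟨hlen, hr1, hr3⟩ := hp
    rcases dice with _|⟨r0,dice⟩; · simp at hlen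
    rcases dice with _|⟨r1,dice⟩; · simp at hlen
    rcases dice with _|⟨r2,dice⟩; · simp at hlen
    rcases dice with _|⟨r3,t⟩; · simp at hlen
    simp only [List.getD_cons_zero, List.getD_cons_succ] at hr1 hr3
    rcases r1 with _|⟨a1,r1⟩; · simp at hr1
    rcases r1 with _|⟨b1,r1⟩; · simp at hr1
    rcases r1 with _|⟨c1,u1⟩; · simp at hr1
    rcases r3 with _|⟨a3,r3⟩; · simp at hr3
    rcases r3 with _|⟨b3,u3⟩; · simp at hr3
    exact roll_eq1 r0 a1 b1 c1 u1 r2 a3 b3 u3 t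
  by_cases h2 : d = 2
  · subst h2
    have hp : 4 ≤ dice.length ∧ 3 ≤ (dice.getD 1 []).length ∧ 2 ≤ (dice.getD 3 []).length := by
      simpa [Pre_rollDice] using hpre
    obtain ⟨hlen, hr1, hr3⟩ := hp
    rcases dice with _|⟨r0,dice⟩; · simp at hlen
    rcases dice with _|⟨r1,dice⟩; · simp at hlen
    rcases dice with _|⟨r2,dice⟩; · simp at hlen
    rcases dice with _|⟨r3,t⟩; · simp at hlen
    simp only [List.getD_cons_zero, List.getD_cons_succ] at hr1 hr3
    rcases r1 with _|⟨a1,r1⟩; · simp at hr1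
    rcases r1 with _|⟨b1,r1⟩; · simp at hr1
    rcases r1 with _|⟨c1,u1⟩; · simp at hr1
    rcases r3 with _|⟨a3,r3⟩; · simp at hr3
    rcases r3 with _|⟨b3,u3⟩; · simp at hr3
    exact roll_eq2 r0 a1 b1 c1 u1 r2 a3 b3 u3 t
  · simp [rollDice, rollDice_alt, h1, h2, h3, h4]
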